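-- pv_equiv track=rewrite | github.com/ganondorofu/portableClipboard | Raspberry/code.py | find_brace_commands
-- ===== SOURCE A (Python) =====
-- def find_brace_commands(text):
--     """Manually search for {command} patterns"""
--     matches = []
--     i = 0
--     while i < len(text):
--         start = text.find('{', i)
--         if start == -1:
--             break
--         end = text.find('}', start)
--         if end == -1:
--             break
--         command = text[start+1:end]
--         matches.append((start, end+1, command))
--         i = end + 1
--     return matches
-- ===== SOURCE B (Python) =====
-- def find_brace_commands(text):
--     """Single state-machine pass: scan characters once, tracking whether we are
--     inside a brace group and accumulating the command characters in a buffer."""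
--     matches = []
--     in_brace = False
--     start = 0
--     buf = []
--     for i, c in enumerate(text):
--         if c == '{' and not in_brace:
--             in_brace = True
--             start = i
--             buf = []
--         elif c == '}' and in_brace:
--             matches.append((start, i + 1, ''.join(buf)))
--             in_brace = False
--         elif in_brace:
--             buf.append(c)
--     return matches
-- ===== Notes on version B (the rewrite author's own statement) =====
-- stated objective: alternative
-- what changed: Replaced the repeated str.find scans and slicing with a single character-by-character state-machine pass that tracks an in_brace flag and accumulates the command in a buffer.
import Mathlib
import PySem

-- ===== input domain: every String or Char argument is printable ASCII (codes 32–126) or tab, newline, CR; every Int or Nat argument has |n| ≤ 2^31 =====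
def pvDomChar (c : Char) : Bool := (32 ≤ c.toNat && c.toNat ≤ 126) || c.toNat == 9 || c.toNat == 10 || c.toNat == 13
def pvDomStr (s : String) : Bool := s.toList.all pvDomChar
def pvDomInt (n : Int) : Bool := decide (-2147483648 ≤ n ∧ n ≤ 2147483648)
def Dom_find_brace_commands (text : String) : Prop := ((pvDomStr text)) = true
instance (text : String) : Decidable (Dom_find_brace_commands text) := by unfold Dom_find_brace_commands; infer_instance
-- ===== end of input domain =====

-- B replaces A's repeated str.find scans with one character-by-character
-- state-machine pass (alternative decomposition, same return value).

-- ===== PORT A =====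
-- A's while loop as fuel recursion; fuel = len+1 suffices since i strictly grows each iteration
def find_brace_goA (text : String) : Nat → Int → List (Int × Int × String)
  | 0, _ => []
  | fuel + 1, i =>
    if i < PySem.Str.len text then
      let start := PySem.Str.findFrom text "{" i
      if start = -1 then []
      else
        let e := PySem.Str.findFrom text "}" start
        if e = -1 then []
        else (start, e + 1, PySem.Str.slice text (some (start + 1)) (some e)) ::
              find_brace_goA text fuel (e + 1)
    else []

def find_brace_commands (text : String) : List (Int × Int × String) :=
  find_brace_goA text (text.length + 1) 0

-- ===== PORT B =====
-- loop body of B: state (matches, in_brace, start, buf)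
def find_brace_stepB (st : List (Int × Int × String) × Bool × Int × List Char)
    (p : Int × Char) : List (Int × Int × String) × Bool × Int × List Char :=
  let (ms, in_brace, start, buf) := st
  let (i, c) := p
  if c = '{' ∧ ¬ in_brace then (ms, true, i, [])
  else if c = '}' ∧ in_brace then (ms ++ [(start, i + 1, String.ofList buf)], false, start, buf)
  else if in_brace then (ms, in_brace, start, buf ++ [c])
  else (ms, in_brace, start, buf)

def find_brace_commands_alt (text : String) : List (Int × Int × String) :=
  ((PySem.List.enumerate text.toList).foldl find_brace_stepB ([], false, 0, [])).1

-- ===== PRECONDITION & SPEC =====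
def Spec_find_brace_commands (text : String) (out : List (Int × Int × String)) : Prop := out = find_brace_commands_alt text
instance (text : String) (out : List (Int × Int × String)) : Decidable (Spec_find_brace_commands text out) := by unfold Spec_find_brace_commands; infer_instance

-- ===== CLAIM (what is proved, stated in full; the proofs are below) =====
def Claim_equal_find_brace_commands : Prop := ∀ (text : String), Dom_find_brace_commands text → Spec_find_brace_commands text (find_brace_commands text)

-- ===== LEMMAS AND PROOFS =====

-- reference state machine on the character list with absolute positions
mutual
def refOut : List Char → Nat → List (Int × Int × String)
  | [], _ => []
  | c :: cs, n => if c = '{' then refIn n [] cs (n + 1) else refOut cs (n + 1)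
def refIn : Nat → List Char → List Char → Nat → List (Int × Int × String)
  | _, _, [], _ => []
  | S, acc, c :: cs, n =>
      if c = '}' then ((S : Int), (n : Int) + 1, String.ofList acc) :: refOut cs (n + 1)
      else refIn S (acc ++ [c]) cs (n + 1)
end

-- the four branches of B's loop body
theorem stepB_open (ms : List (Int × Int × String)) (s i : Int) (b : List Char) (c : Char)
    (hc : c = '{') : find_brace_stepB (ms, false, s, b) (i, c) = (ms, true, i, []) := by
  simp [find_brace_stepB, hc]

theorem stepB_skip (ms : List (Int × Int × String)) (s i : Int) (b : List Char) (c : Char)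
    (hc : c ≠ '{') : find_brace_stepB (ms, false, s, b) (i, c) = (ms, false, s, b) := by
  simp [find_brace_stepB, hc]

theorem stepB_close (ms : List (Int × Int × String)) (s i : Int) (b : List Char) (c : Char)
    (hc : c = '}') : find_brace_stepB (ms, true, s, b) (i, c)
      = (ms ++ [(s, i + 1, String.ofList b)], false, s, b) := by
  simp [find_brace_stepB, hc]

theorem stepB_acc (ms : List (Int × Int × String)) (s i : Int) (b : List Char) (c : Char)
    (hc : c ≠ '}') : find_brace_stepB (ms, true, s, b) (i, c) = (ms, true, s, b ++ [c]) := by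
  by_cases h : c = '{' <;> simp [find_brace_stepB, hc, h]

-- B's fold equals the reference machine
theorem foldB_ref (l : List Char) : ∀ (n : Nat),
    (∀ ms s b, ((PySem.List.enumerate l (n : Int)).foldl find_brace_stepB (ms, false, s, b)).1
        = ms ++ refOut l n) ∧
    (∀ ms (S : Nat) b, ((PySem.List.enumerate l (n : Int)).foldl find_brace_stepB (ms, true, (S : Int), b)).1
        = ms ++ refIn S b l n) := by
  induction l with
  | nil => intro n; simp [PySem.List.enumerate, refOut, refIn]
  | cons c cs ih =>
    intro n
    have hne : ((n : Int) + 1) = ((n + 1 : Nat) : Int) := by push_cast; ring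
    constructor
    · intro ms s b
      rw [PySem.List.enumerate_cons]
      by_cases hc : c = '{'
      · rw [List.foldl_cons, stepB_open ms s _ b c hc, hne, (ih (n + 1)).2 ms n []]
        simp [refOut, hc]
      · rw [List.foldl_cons, stepB_skip ms s _ b c hc, hne, (ih (n + 1)).1 ms s b]
        simp [refOut, hc]
    · intro ms S b
      rw [PySem.List.enumerate_cons]
      by_cases hc : c = '}'
      · rw [List.foldl_cons, stepB_close ms _ _ b c hc, hne, (ih (n + 1)).1]
        simp [refIn, hc]
      · rw [List.foldl_cons, stepB_acc ms _ _ b c hc, hne, (ih (n + 1)).2 ms S (b ++ [c])]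
        simp [refIn, hc]

theorem singleton_prefix_iff {a : Char} {l : List Char} : [a] <+: l ↔ l[0]? = some a := by
  cases l with
  | nil => simp
  | cons b t => simp [List.cons_prefix_cons, eq_comm]

theorem prefix_drop_iff {a : Char} {l : List Char} {i : Nat} :
    [a] <+: l.drop i ↔ l[i]? = some a := by
  rw [singleton_prefix_iff, List.getElem?_drop]; simp

theorem refOut_no_open : ∀ (l : List Char) (n : Nat), '{' ∉ l → refOut l n = [] := by
  intro l
  induction l with
  | nil => intro n _; rfl
  | cons c cs ih =>
    intro n h
    simp only [List.mem_cons, not_or] at h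
    simp [refOut, Ne.symm h.1, ih (n + 1) h.2]

theorem refIn_no_close : ∀ (l : List Char) (S : Nat) (acc : List Char) (n : Nat),
    '}' ∉ l → refIn S acc l n = [] := by
  intro l
  induction l with
  | nil => intro S acc n _; rfl
  | cons c cs ih =>
    intro S acc n h
    simp only [List.mem_cons, not_or] at h
    simp [refIn, Ne.symm h.1, ih _ _ (n + 1) h.2]

theorem refOut_skip (cs : List Char) : ∀ (d i : Nat),
    (∀ k, i ≤ k → k < i + d → cs[k]? ≠ some '{') →
    refOut (cs.drop i) i = refOut (cs.drop (i + d)) (i + d) := by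
  intro d
  induction d with
  | zero => intro i _; rfl
  | succ d ih =>
    intro i h
    by_cases hi : i < cs.length
    · rw [List.drop_eq_getElem_cons hi]
      have hne : cs[i] ≠ '{' := by
        intro he
        exact h i le_rfl (by omega) (by simp [List.getElem?_eq_getElem hi, he])
      simp only [refOut, if_neg hne]
      have := ih (i + 1) (fun k hk1 hk2 => h k (by omega) (by omega))
      rw [this]; ring_nf
    · have h1 : cs.drop i = [] := List.drop_eq_nil_of_le (by omega)
      have h2 : cs.drop (i + (d + 1)) = [] := List.drop_eq_nil_of_le (by omega)
      rw [h1, h2]; rfl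

theorem refIn_skip (cs : List Char) : ∀ (d i : Nat) (S : Nat) (acc : List Char),
    (∀ k, i ≤ k → k < i + d → cs[k]? ≠ some '}') →
    refIn S acc (cs.drop i) i
      = refIn S (acc ++ (cs.drop i).take d) (cs.drop (i + d)) (i + d) := by
  intro d
  induction d with
  | zero => intro i S acc _; simp
  | succ d ih =>
    intro i S acc h
    by_cases hi : i < cs.length
    · rw [List.drop_eq_getElem_cons hi]
      have hne : cs[i] ≠ '}' := by
        intro he
        exact h i le_rfl (by omega) (by simp [List.getElem?_eq_getElem hi, he])
      simp only [refIn, if_neg hne, List.take_succ_cons]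
      have := ih (i + 1) S (acc ++ [cs[i]]) (fun k hk1 hk2 => h k (by omega) (by omega))
      rw [this]
      have harr : acc ++ [cs[i]] ++ (cs.drop (i + 1)).take d
          = acc ++ (cs[i] :: (cs.drop (i + 1)).take d) := by simp
      rw [harr]; ring_nf
    · have h1 : cs.drop i = [] := List.drop_eq_nil_of_le (by omega)
      have h2 : cs.drop (i + (d + 1)) = [] := List.drop_eq_nil_of_le (by omega)
      rw [h1, h2]; simp [refIn]

theorem singleton_infix_iff {a : Char} {l : List Char} : [a] <:+: l ↔ a ∈ l := by
  constructor
  · intro h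
    exact (List.singleton_sublist).1 h.sublist
  · intro h
    obtain ⟨s, t, rfl⟩ := List.append_of_mem h
    exact ⟨s, t, by simp⟩

theorem str_len_eq (s : String) : PySem.Str.len s = (s.toList.length : Int) := by
  simp [PySem.Str.len]

-- main lemma for A's loop
theorem goA_ref (text : String) : ∀ (fuel k : Nat),
    k ≤ text.toList.length → text.toList.length - k < fuel →
    find_brace_goA text fuel (k : Int) = refOut (text.toList.drop k) k := by
  intro fuel
  induction fuel with
  | zero => intro k _ hf; omega
  | succ fuel ih =>
    intro k hk hf
    by_cases hlt : k < text.toList.length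
    case neg =>
      have hkL : k = text.toList.length := by omega
      simp only [find_brace_goA, str_len_eq]
      rw [if_neg (by exact_mod_cast not_lt.mpr (le_of_eq hkL.symm))]
      rw [hkL, List.drop_length]
      rfl
    case pos =>
      simp only [find_brace_goA, str_len_eq, PySem.Str.findFrom_eq]
      rw [if_pos (by exact_mod_cast hlt)]
      have hop : ("{" : String).toList = ['{'] := rfl
      have hcl : ("}" : String).toList = ['}'] := rfl
      rw [hop, hcl]
      set cs := text.toList with hcs
      by_cases h1 : PySem.Chars.findFrom cs ['{'] (k : Int) = -1
      · rw [if_pos h1]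
        have hno : ¬ ['{'] <:+: cs.drop k :=
          (PySem.Chars.findFrom_natCast_eq_neg_one_iff cs ['{'] k hk).mp h1
        rw [refOut_no_open (cs.drop k) k (fun hm => hno (singleton_infix_iff.mpr hm))]
      · rw [if_neg h1]
        obtain ⟨hg1, hg2, hg3⟩ := PySem.Chars.findFrom_natCast_spec cs ['{'] k hk h1
        set r := PySem.Chars.findFrom cs ['{'] (k : Int) with hr
        have hr0 : 0 ≤ r := le_trans (by positivity) hg1
        set s := r.toNat with hs
        have hrs : r = (s : Int) := (Int.toNat_of_nonneg hr0).symm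
        have hcsS : cs[s]? = some '{' := prefix_drop_iff.mp hg2
        have hslen : s < cs.length := by
          rcases List.getElem?_eq_some_iff.mp hcsS with ⟨hlt', _⟩; exact hlt'
        have hks : k ≤ s := by rw [hrs] at hg1; exact_mod_cast hg1
        -- skip to the first '{'
        have hskip : refOut (cs.drop k) k = refOut (cs.drop s) s := by
          have := refOut_skip cs (s - k) k (fun j hj1 hj2 => by
            intro he
            exact hg3 j hj1 (by omega) (prefix_drop_iff.mpr he))
          rwa [show k + (s - k) = s by omega] at this
        rw [hskip, List.drop_eq_getElem_cons hslen]
        have hsopen : cs[s] = '{' := by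
          have := List.getElem?_eq_getElem hslen
          rw [this] at hcsS; exact Option.some_inj.mp hcsS
        simp only [refOut, hsopen, if_pos]
        -- second find
        have hslen' : s ≤ cs.length := le_of_lt hslen
        by_cases h2 : PySem.Chars.findFrom cs ['}'] ((s : Int)) = -1
        · rw [hrs, if_pos h2]
          have hno : ¬ ['}'] <:+: cs.drop s :=
            (PySem.Chars.findFrom_natCast_eq_neg_one_iff cs ['}'] s hslen').mp h2
          have hno' : '}' ∉ cs.drop (s + 1) := by
            intro hm
            exact hno (singleton_infix_iff.mpr
              (List.mem_of_mem_drop (by rw [List.drop_drop]; exact hm)))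
          rw [refIn_no_close _ _ _ _ hno']
        · rw [hrs, if_neg h2]
          obtain ⟨hh1, hh2, hh3⟩ := PySem.Chars.findFrom_natCast_spec cs ['}'] s hslen' h2
          set r2 := PySem.Chars.findFrom cs ['}'] ((s : Nat) : Int) with hr2
          have hr20 : 0 ≤ r2 := le_trans (by positivity) hh1
          set t := r2.toNat with ht
          have hrt : r2 = (t : Int) := (Int.toNat_of_nonneg hr20).symm
          have hcsT : cs[t]? = some '}' := prefix_drop_iff.mp hh2
          have htlen : t < cs.length := by
            rcases List.getElem?_eq_some_iff.mp hcsT with ⟨hlt', _⟩; exact hlt'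
          have hst : s ≤ t := by rw [hrt] at hh1; exact_mod_cast hh1
          have hst' : s + 1 ≤ t := by
            rcases Nat.lt_or_ge s t with h | h
            · omega
            · exfalso
              have : s = t := by omega
              rw [List.getElem?_eq_getElem hslen, hsopen] at hcsS
              rw [← this, List.getElem?_eq_getElem hslen, hsopen] at hcsT
              exact absurd (Option.some_inj.mp hcsT) (by decide)
          -- skip inside the braces up to the first '}'
          have hskip2 : refIn s [] (cs.drop (s + 1)) (s + 1)
              = refIn s ((cs.drop (s + 1)).take (t - (s + 1))) (cs.drop t) t := by
            have := refIn_skip cs (t - (s + 1)) (s + 1) s [] (fun j hj1 hj2 => by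
              intro he
              exact hh3 j (by omega) (by omega) (prefix_drop_iff.mpr he))
            rwa [show s + 1 + (t - (s + 1)) = t by omega, List.nil_append] at this
          rw [hskip2, List.drop_eq_getElem_cons htlen]
          have htclose : cs[t] = '}' := by
            have := List.getElem?_eq_getElem htlen
            rw [this] at hcsT; exact Option.some_inj.mp hcsT
          simp only [refIn, htclose, if_pos]
          -- heads and tails
          have hcast : r2 + 1 = ((t + 1 : Nat) : Int) := by rw [hrt]; push_cast; ring
          rw [hcast, ih (t + 1) (by omega) (by omega)]
          have hslice : PySem.Str.slice text (some (((s : Nat) : Int) + 1)) (some r2)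
              = String.ofList ((cs.drop (s + 1)).take (t - (s + 1))) := by
            apply String.toList_inj.mp
            rw [PySem.Str.toList_slice, String.toList_ofList, ← hcs, hrt]
            rw [show ((s : Nat) : Int) + 1 = ((s + 1 : Nat) : Int) by push_cast; ring]
            rw [PySem.Chars.slice_eq_listSlice, PySem.List.slice_natCast]
          rw [hslice]
          norm_cast

-- ===== VERDICT (by name: the statement is the Claim_ definition above) =====
theorem find_brace_commands_spec : Claim_equal_find_brace_commands := by
  intro text _
  unfold Spec_find_brace_commands find_brace_commands find_brace_commands_alt
  have hA := goA_ref text (text.length + 1) 0 (by simp) (by rw [String.length_toList]; omega)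
  have hB := (foldB_ref text.toList 0).1 [] 0 []
  simp only [Nat.cast_zero] at hA hB
  rw [hA]
  rw [show PySem.List.enumerate text.toList = PySem.List.enumerate text.toList (0 : Int) from rfl, hB]
  simp
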